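-- pv_equiv track=rewrite | github.com/jJup0/LeetCode | Medium/959. Regions Cut By Slashes.py | _convert_grid_to_binary
-- ===== SOURCE A (Python) =====
-- def _convert_grid_to_binary(grid: list[str]) -> list[list[int]]:
--     """
--     Converts the slash grid into a binary grid.
--     O(n^2) / O(n^2)     time / space complexity
--     """
--     # 0 reprents empty space, 1 represents border or line
--     binary_grid: list[list[int]] = [[1] * (len(grid) * 3 + 2)]
--     for row in grid:
--         # left border
--         block_row1 = [1]
--         block_row2 = [1]
--         block_row3 = [1]
--         for char in row:
--             if char == " ":
--                 block_row1.extend((0, 0, 0))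
--                 block_row2.extend((0, 0, 0))
--                 block_row3.extend((0, 0, 0))
--             elif char == "/":
--                 block_row1.extend((0, 0, 1))
--                 block_row2.extend((0, 1, 0))
--                 block_row3.extend((1, 0, 0))
--             else:  # "\"
--                 block_row1.extend((1, 0, 0))
--                 block_row2.extend((0, 1, 0))
--                 block_row3.extend((0, 0, 1))
--
--         # right border
--         block_row1.append(1)
--         block_row2.append(1)
--         block_row3.append(1)
--         binary_grid.append(block_row1)
--         binary_grid.append(block_row2)
--         binary_grid.append(block_row3)
--
--     binary_grid.append([1] * (len(grid) * 3 + 2))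
--     return binary_grid
-- ===== SOURCE B (Python) =====
-- def _cell(ch: str, r: int, c: int) -> int:
--     if ch == " ":
--         return 0
--     if ch == "/":
--         return 1 if r + c == 2 else 0
--     return 1 if r == c else 0
--
--
-- def _convert_grid_to_binary(grid: list[str]) -> list[list[int]]:
--     """Build each output row directly from its coordinates instead of
--     accumulating three parallel sub-rows per source character."""
--     n = len(grid)
--     out: list[list[int]] = []
--     for R in range(3 * n + 2):
--         if R == 0 or R == 3 * n + 1:
--             out.append([1] * (3 * n + 2))
--             continue
--         src = grid[(R - 1) // 3]
--         r = (R - 1) % 3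
--         w = 3 * len(src) + 2
--         out.append(
--             [
--                 _cell(src[(C - 1) // 3], r, (C - 1) % 3)
--                 if 0 < C < w - 1
--                 else 1
--                 for C in range(w)
--             ]
--         )
--     return out
-- ===== Notes on version B (the rewrite author's own statement) =====
-- stated objective: alternative
-- what changed: B computes every output cell directly from its coordinates (border test, then char = grid[(R-1)//3], sub-position (R-1)%3,(C-1)%3) instead of A's accumulation of three parallel sub-rows extended by 3-tuples per source character.
import Mathlib
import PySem

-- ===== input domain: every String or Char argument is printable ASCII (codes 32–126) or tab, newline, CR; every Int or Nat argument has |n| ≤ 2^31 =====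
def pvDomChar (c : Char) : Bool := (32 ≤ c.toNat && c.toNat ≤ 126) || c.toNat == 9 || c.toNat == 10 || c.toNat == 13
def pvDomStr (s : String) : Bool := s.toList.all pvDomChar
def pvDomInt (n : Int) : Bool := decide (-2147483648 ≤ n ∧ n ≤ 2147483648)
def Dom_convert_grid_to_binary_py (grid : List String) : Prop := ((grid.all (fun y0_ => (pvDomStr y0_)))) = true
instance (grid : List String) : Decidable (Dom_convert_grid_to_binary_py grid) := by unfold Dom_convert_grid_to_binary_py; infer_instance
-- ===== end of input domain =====

-- B builds each output row cell-by-cell from coordinates instead of A's per-character 3-tuple accumulation; same values, same cost.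

-- ===== PORT A =====
-- literal transliteration of A: outer fold appends three accumulated block rows per source row
def convert_grid_to_binary_py (grid : List String) : List (List Int) :=
  let binary_grid : List (List Int) := [List.replicate (grid.length * 3 + 2) (1 : Int)]
  let bg := grid.foldl (fun acc row =>
    let t := row.toList.foldl (fun (b : List Int × List Int × List Int) char =>
      if char = ' ' then (b.1 ++ [0, 0, 0], b.2.1 ++ [0, 0, 0], b.2.2 ++ [0, 0, 0])
      else if char = '/' then (b.1 ++ [0, 0, 1], b.2.1 ++ [0, 1, 0], b.2.2 ++ [1, 0, 0])
      else (b.1 ++ [1, 0, 0], b.2.1 ++ [0, 1, 0], b.2.2 ++ [0, 0, 1]))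
      (([1], [1], [1]) : List Int × List Int × List Int)
    acc ++ [t.1 ++ [1], t.2.1 ++ [1], t.2.2 ++ [1]]) binary_grid
  bg ++ [List.replicate (grid.length * 3 + 2) (1 : Int)]

-- ===== PORT B =====
def cellB (ch : Char) (r c : Nat) : Int :=
  if ch = ' ' then 0
  else if ch = '/' then (if r + c = 2 then 1 else 0)
  else (if r = c then 1 else 0)

-- literal transliteration of B: one row per output coordinate R, one cell per coordinate C.
-- Python indices (R-1)//3, (C-1)//3 are always in range there, so getD is exact.
def convert_grid_to_binary_py_alt (grid : List String) : List (List Int) :=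
  let n := grid.length
  (List.range (3 * n + 2)).map (fun R =>
    if R = 0 ∨ R = 3 * n + 1 then List.replicate (3 * n + 2) (1 : Int)
    else
      let src := (grid.getD ((R - 1) / 3) "").toList
      let r := (R - 1) % 3
      let w := 3 * src.length + 2
      (List.range w).map (fun C =>
        if 0 < C ∧ C < w - 1 then cellB (src.getD ((C - 1) / 3) ' ') r ((C - 1) % 3)
        else 1))

-- ===== PRECONDITION & SPEC =====
def Spec_convert_grid_to_binary_py (grid : List String) (out : List (List Int)) : Prop := out = convert_grid_to_binary_py_alt grid
instance (grid : List String) (out : List (List Int)) : Decidable (Spec_convert_grid_to_binary_py grid out) := by unfold Spec_convert_grid_to_binary_py; infer_instance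

-- ===== CLAIM (what is proved, stated in full; the proofs are below) =====
def Claim_equal_convert_grid_to_binary_py : Prop := ∀ (grid : List String), Dom_convert_grid_to_binary_py grid → Spec_convert_grid_to_binary_py grid (convert_grid_to_binary_py grid)

-- ===== LEMMAS AND PROOFS =====

-- the three per-character 3-tuples of A, as functions
def t1 (c : Char) : List Int := if c = ' ' then [0,0,0] else if c = '/' then [0,0,1] else [1,0,0]
def t2 (c : Char) : List Int := if c = ' ' then [0,0,0] else if c = '/' then [0,1,0] else [0,1,0]
def t3 (c : Char) : List Int := if c = ' ' then [0,0,0] else if c = '/' then [1,0,0] else [0,0,1]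

-- A's inner fold over the characters, closed form
lemma inner_fold (l : List Char) (a b c : List Int) :
    l.foldl (fun (b : List Int × List Int × List Int) char =>
      if char = ' ' then (b.1 ++ [0, 0, 0], b.2.1 ++ [0, 0, 0], b.2.2 ++ [0, 0, 0])
      else if char = '/' then (b.1 ++ [0, 0, 1], b.2.1 ++ [0, 1, 0], b.2.2 ++ [1, 0, 0])
      else (b.1 ++ [1, 0, 0], b.2.1 ++ [0, 1, 0], b.2.2 ++ [0, 0, 1])) (a, b, c)
    = (a ++ l.flatMap t1, b ++ l.flatMap t2, c ++ l.flatMap t3) := by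
  induction l generalizing a b c with
  | nil => simp
  | cons x xs ih =>
    simp only [List.foldl_cons]
    split_ifs <;> simp [t1, t2, t3, *, List.flatMap_cons, List.append_assoc]

-- range (n+2) split into first element, middle shifted by one, last element
lemma range_split (n : Nat) {β : Type} (f : Nat → β) :
    (List.range (n + 2)).map f
      = f 0 :: ((List.range n).map (fun i => f (i + 1))) ++ [f (n + 1)] := by
  have : n + 2 = (n + 1) + 1 := rfl
  rw [this, List.range_succ, List.map_append, List.range_succ_eq_map]
  simp [Function.comp]

-- map over range (3*len l) with index arithmetic = flatMap of triples over l
lemma range3_flatMap {α β : Type} (l : List α) (d : α) (f : α → Nat → β) :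
    (List.range (3 * l.length)).map (fun i => f (l.getD (i / 3) d) (i % 3))
      = l.flatMap (fun a => [f a 0, f a 1, f a 2]) := by
  induction l using List.reverseRecOn with
  | nil => simp
  | append_singleton l a ih =>
    have hlen : 3 * (l ++ [a]).length = 3 * l.length + 1 + 1 + 1 := by
      simp [List.length_append]; ring
    rw [hlen, List.range_succ, List.range_succ, List.range_succ]
    simp only [List.map_append]
    have hmid : ((List.range (3 * l.length)).map
        (fun i => f ((l ++ [a]).getD (i / 3) d) (i % 3)))
        = (List.range (3 * l.length)).map (fun i => f (l.getD (i / 3) d) (i % 3)) := by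
      apply List.map_congr_left
      intro i hi
      have hi' : i < 3 * l.length := List.mem_range.mp hi
      have : i / 3 < l.length := by omega
      rw [List.getD_append _ _ _ _ this]
    rw [hmid, ih]
    have hgd : (l ++ [a]).getD l.length d = a := by
      simp [List.getD_eq_getElem?_getD]
    have e0 : 3 * l.length / 3 = l.length := by omega
    have e1 : (3 * l.length + 1) / 3 = l.length := by omega
    have e2 : (3 * l.length + 2) / 3 = l.length := by omega
    have m0 : 3 * l.length % 3 = 0 := by omega
    have m1 : (3 * l.length + 1) % 3 = 1 := by omega
    have m2 : (3 * l.length + 2) % 3 = 2 := by omega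
    simp only [List.map_cons, List.map_nil]
    rw [e0, e1, e2, m0, m1, m2, hgd]
    simp [List.flatMap_append]

-- B's inner row for a source row and sub-row index r equals A's block row
lemma inner_row (row : List Char) (tr : Char → List Int) (r : Nat)
    (hcell : ∀ ch, [cellB ch r 0, cellB ch r 1, cellB ch r 2] = tr ch) :
    (List.range (3 * row.length + 2)).map (fun C =>
        if 0 < C ∧ C < (3 * row.length + 2) - 1 then
          cellB (row.getD ((C - 1) / 3) ' ') r ((C - 1) % 3)
        else 1)
      = (1 : Int) :: row.flatMap tr ++ [1] := by
  rw [range_split]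
  have hz : ¬ (0 < 0 ∧ (0:Nat) < (3 * row.length + 2) - 1) := by omega
  have he : ¬ (0 < 3 * row.length + 1 ∧ 3 * row.length + 1 < (3 * row.length + 2) - 1) := by omega
  rw [if_neg hz, if_neg he]
  have hmid : ((List.range (3 * row.length)).map (fun i =>
      if 0 < i + 1 ∧ i + 1 < (3 * row.length + 2) - 1 then
        cellB (row.getD ((i + 1 - 1) / 3) ' ') r ((i + 1 - 1) % 3)
      else 1))
      = (List.range (3 * row.length)).map (fun i =>
          cellB (row.getD (i / 3) ' ') r (i % 3)) := by
    apply List.map_congr_left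
    intro i hi
    have hi' : i < 3 * row.length := List.mem_range.mp hi
    rw [if_pos (by omega)]
    simp
  have h3 := range3_flatMap row ' ' (fun ch c => cellB ch r c)
  rw [hmid, h3, funext hcell]

lemma cell_t1 (ch : Char) : [cellB ch 0 0, cellB ch 0 1, cellB ch 0 2] = t1 ch := by
  unfold cellB t1; split_ifs <;> simp_all

lemma cell_t2 (ch : Char) : [cellB ch 1 0, cellB ch 1 1, cellB ch 1 2] = t2 ch := by
  unfold cellB t2; split_ifs <;> simp_all

lemma cell_t3 (ch : Char) : [cellB ch 2 0, cellB ch 2 1, cellB ch 2 2] = t3 ch := by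
  unfold cellB t3; split_ifs <;> simp_all

-- ===== VERDICT (by name: the statement is the Claim_ definition above) =====
theorem convert_grid_to_binary_py_spec : Claim_equal_convert_grid_to_binary_py := by
  intro grid _
  show convert_grid_to_binary_py grid = convert_grid_to_binary_py_alt grid
  unfold convert_grid_to_binary_py convert_grid_to_binary_py_alt
  simp only []
  -- A side: outer loop is 'acc ++ [three rows]' → flatMap; inner loop closed by inner_fold
  rw [PySem.List.foldl_append_eq_flatMap]
  simp only [inner_fold]
  -- B side: peel first and last output row, close the middle with range3_flatMap
  rw [range_split]
  rw [if_pos (Or.inl rfl), if_pos (Or.inr rfl)]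
  have hmid : ((List.range (3 * grid.length)).map (fun i =>
      if i + 1 = 0 ∨ i + 1 = 3 * grid.length + 1 then
        List.replicate (3 * grid.length + 2) (1 : Int)
      else
        (List.range (3 * ((grid.getD ((i + 1 - 1) / 3) "").toList.length) + 2)).map (fun C =>
          if 0 < C ∧ C < (3 * ((grid.getD ((i + 1 - 1) / 3) "").toList.length) + 2) - 1 then
            cellB ((grid.getD ((i + 1 - 1) / 3) "").toList.getD ((C - 1) / 3) ' ')
              ((i + 1 - 1) % 3) ((C - 1) % 3)
          else 1)))
      = (List.range (3 * grid.length)).map (fun i =>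
          (List.range (3 * ((grid.getD (i / 3) "").toList.length) + 2)).map (fun C =>
            if 0 < C ∧ C < (3 * ((grid.getD (i / 3) "").toList.length) + 2) - 1 then
              cellB ((grid.getD (i / 3) "").toList.getD ((C - 1) / 3) ' ')
                (i % 3) ((C - 1) % 3)
            else 1)) := by
    apply List.map_congr_left
    intro i hi
    have hi' : i < 3 * grid.length := List.mem_range.mp hi
    rw [if_neg (by omega)]
    simp
  have h3 := range3_flatMap grid "" (fun (s : String) (r : Nat) =>
    (List.range (3 * s.toList.length + 2)).map (fun C =>
      if 0 < C ∧ C < (3 * s.toList.length + 2) - 1 then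
        cellB (s.toList.getD ((C - 1) / 3) ' ') r ((C - 1) % 3)
      else 1))
  rw [hmid, h3]
  have hrow : ∀ (s : String),
      ([(List.range (3 * s.toList.length + 2)).map (fun C =>
          if 0 < C ∧ C < (3 * s.toList.length + 2) - 1 then
            cellB (s.toList.getD ((C - 1) / 3) ' ') 0 ((C - 1) % 3) else 1),
        (List.range (3 * s.toList.length + 2)).map (fun C =>
          if 0 < C ∧ C < (3 * s.toList.length + 2) - 1 then
            cellB (s.toList.getD ((C - 1) / 3) ' ') 1 ((C - 1) % 3) else 1),
        (List.range (3 * s.toList.length + 2)).map (fun C =>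
          if 0 < C ∧ C < (3 * s.toList.length + 2) - 1 then
            cellB (s.toList.getD ((C - 1) / 3) ' ') 2 ((C - 1) % 3) else 1)] : List (List Int))
      = [(1 : Int) :: s.toList.flatMap t1 ++ [1],
         (1 : Int) :: s.toList.flatMap t2 ++ [1],
         (1 : Int) :: s.toList.flatMap t3 ++ [1]] := by
    intro s
    rw [inner_row s.toList t1 0 cell_t1, inner_row s.toList t2 1 cell_t2,
        inner_row s.toList t3 2 cell_t3]
  rw [funext hrow]
  simp [Nat.mul_comm]
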